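-- pv_equiv track=rewrite | github.com/Yucheng7713/CodingPracticeByYuch | Easy/811_subdomainVisitCount.py | getAllSubDomains
-- ===== SOURCE A (Python) =====
-- def getAllSubDomains(domainStr):
--     d_str, results = "", []
--     subdomains = domainStr.split('.')[::-1]
--     for sub_d in subdomains:
--         d_str = sub_d + d_str
--         results.append(d_str);
--         d_str = '.' + d_str
--     return results
-- ===== SOURCE B (Python) =====
-- def getAllSubDomains(domainStr):
--     parts = domainStr.split('.')
--     return ['.'.join(parts[i:]) for i in range(len(parts) - 1, -1, -1)]
-- ===== Notes on version B (the rewrite author's own statement) =====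
-- stated objective: simpler
-- what changed: B drops A's mutated running-accumulator string and its reversed loop: it splits once and returns a comprehension that independently joins each suffix parts[i:] for i counting down.
import Mathlib
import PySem

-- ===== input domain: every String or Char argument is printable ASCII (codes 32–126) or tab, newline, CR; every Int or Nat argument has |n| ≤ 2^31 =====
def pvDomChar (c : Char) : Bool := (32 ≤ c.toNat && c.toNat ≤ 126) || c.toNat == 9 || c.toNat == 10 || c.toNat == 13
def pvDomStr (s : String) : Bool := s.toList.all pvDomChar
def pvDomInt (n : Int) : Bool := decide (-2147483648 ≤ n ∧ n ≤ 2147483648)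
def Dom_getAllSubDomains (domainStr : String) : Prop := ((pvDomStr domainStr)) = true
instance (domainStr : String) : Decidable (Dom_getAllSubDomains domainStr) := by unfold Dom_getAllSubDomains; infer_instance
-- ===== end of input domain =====

-- B replaces A's mutated running-accumulator string with one split and independent suffix joins (objective: simpler).

-- ===== PORT A =====
def getAllSubDomains (domainStr : String) : List String :=
  -- subdomains = domainStr.split('.')[::-1]
  let subdomains := (PySem.List.slice? ((PySem.Str.split? domainStr ".").getD []) none none (-1)).getD []
  -- for sub_d in subdomains: d_str = sub_d + d_str; results.append(d_str); d_str = '.' + d_str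
  (subdomains.foldl
    (fun (st : String × List String) sub_d =>
      let d_str := sub_d ++ st.1
      ("." ++ d_str, st.2 ++ [d_str]))
    ("", [])).2

-- ===== PORT B =====
def getAllSubDomains_alt (domainStr : String) : List String :=
  let parts := (PySem.Str.split? domainStr ".").getD []
  (PySem.List.pyRange ((parts.length : Int) - 1) (-1) (-1)).map
    (fun i => PySem.Str.join "." (PySem.List.slice parts (some i) none))

-- ===== PRECONDITION & SPEC =====
def Spec_getAllSubDomains (domainStr : String) (out : List String) : Prop := out = getAllSubDomains_alt domainStr
instance (domainStr : String) (out : List String) : Decidable (Spec_getAllSubDomains domainStr out) := by unfold Spec_getAllSubDomains; infer_instance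

-- ===== CLAIM (what is proved, stated in full; the proofs are below) =====
def Claim_equal_getAllSubDomains : Prop := ∀ (domainStr : String), Dom_getAllSubDomains domainStr → Spec_getAllSubDomains domainStr (getAllSubDomains domainStr)

-- ===== LEMMAS AND PROOFS =====

-- A's loop body as a step function, and its unrolled result/accumulator.
def pvStep (st : String × List String) (sub_d : String) : String × List String :=
  let d_str := sub_d ++ st.1
  ("." ++ d_str, st.2 ++ [d_str])

def pvRes : List String → String → List String
  | [], _ => []
  | s :: t, d => (s ++ d) :: pvRes t ("." ++ (s ++ d))

def pvAcc : List String → String → String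
  | [], d => d
  | s :: t, d => pvAcc t ("." ++ (s ++ d))

theorem pvFoldA (ys : List String) (d : String) (r : List String) :
    ys.foldl pvStep (d, r) = (pvAcc ys d, r ++ pvRes ys d) := by
  induction ys generalizing d r with
  | nil => simp [pvAcc, pvRes]
  | cons s t ih => simp [pvStep, pvAcc, pvRes, ih]

theorem pvJoin_cons_cons (a b : String) (l : List String) :
    PySem.Str.join "." (a :: b :: l) = a ++ "." ++ PySem.Str.join "." (b :: l) := by
  apply String.ext
  simp [PySem.Str.toList_join, PySem.Chars.join_cons_cons]

theorem pvJoin_singleton (a : String) : PySem.Str.join "." [a] = a := by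
  apply String.ext
  simp [PySem.Str.toList_join, PySem.Chars.join_singleton]

theorem pvJoin_append_singleton (zs : List String) (s : String) (h : zs ≠ []) :
    PySem.Str.join "." (zs ++ [s]) = PySem.Str.join "." zs ++ "." ++ s := by
  induction zs with
  | nil => exact absurd rfl h
  | cons a t ih =>
    cases t with
    | nil => simp [pvJoin_cons_cons, pvJoin_singleton]
    | cons b u =>
      have h1 : ((a :: b :: u) ++ [s]) = a :: b :: (u ++ [s]) := rfl
      rw [h1, pvJoin_cons_cons a b (u ++ [s])]
      have h3 : (b :: (u ++ [s])) = (b :: u) ++ [s] := rfl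
      rw [h3, ih (by simp), pvJoin_cons_cons]
      simp [String.append_assoc]

-- closed form of A's results list: k-th entry is the reversed (k+1)-prefix joined, plus the pending accumulator d.
theorem pvResSpec (ys : List String) (d : String) :
    pvRes ys d = (List.range ys.length).map
      (fun k => PySem.Str.join "." ((ys.take (k+1)).reverse) ++ d) := by
  induction ys generalizing d with
  | nil => simp [pvRes]
  | cons s t ih =>
    simp only [pvRes, List.length_cons, List.range_succ_eq_map, List.map_cons, List.map_map,
      List.cons.injEq]
    refine ⟨?_, ?_⟩
    · simp [pvJoin_singleton]
    · rw [ih ("." ++ (s ++ d))]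
      apply List.map_congr_left
      intro k hk
      have hk' : k < t.length := List.mem_range.mp hk
      have hne : ((t.take (k+1)).reverse) ≠ [] := by
        simp only [ne_eq, List.reverse_eq_nil_iff, List.take_eq_nil_iff]
        rintro (h | h)
        · omega
        · simp [h] at hk'
      simp only [Function.comp_apply, List.take_succ_cons, List.reverse_cons]
      rw [pvJoin_append_singleton _ _ hne]
      simp [String.append_assoc]

theorem pvTakeRevRev (xs : List String) (m : Nat) :
    (xs.reverse.take m).reverse = xs.drop (xs.length - m) := by
  rw [List.take_reverse]
  simp

-- the core equality, over the already-split parts list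
theorem pvCore (parts : List String) :
    ((((PySem.List.slice? parts none none (-1)).getD []).foldl pvStep ("", [])).2)
      = (PySem.List.pyRange ((parts.length : Int) - 1) (-1) (-1)).map
          (fun i => PySem.Str.join "." (PySem.List.slice parts (some i) none)) := by
  rw [PySem.List.slice?_none_none_neg_one]
  simp only [Option.getD_some]
  rw [pvFoldA]
  simp only [List.nil_append]
  rw [pvResSpec]
  rw [PySem.List.pyRange_neg_one]
  have hlen : ((parts.length : Int) - 1 - (-1)).toNat = parts.length := by omega
  rw [hlen]
  simp only [List.length_reverse, List.map_map]
  apply List.map_congr_left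
  intro k hk
  have hk' : k < parts.length := List.mem_range.mp hk
  have hidx : ((parts.length : Int) - 1 - (k : Int)) = ((parts.length - 1 - k : Nat) : Int) := by
    omega
  simp only [Function.comp_apply, hidx]
  rw [PySem.List.slice_from_natCast]
  rw [pvTakeRevRev parts (k+1)]
  have : parts.length - (k + 1) = parts.length - 1 - k := by omega
  rw [this]
  apply String.ext
  simp

-- ===== VERDICT (by name: the statement is the Claim_ definition above) =====
theorem getAllSubDomains_spec : Claim_equal_getAllSubDomains := by
  intro domainStr _
  unfold Spec_getAllSubDomains getAllSubDomains getAllSubDomains_alt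
  exact pvCore ((PySem.Str.split? domainStr ".").getD [])
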